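-- pv_equiv track=rewrite | github.com/th3lias/ApxKit | interpolate/smolyak.py | _phi_chain
-- ===== SOURCE A (Python) =====
-- def _phi_chain(n):
--     """
--     For each number in 1 to n, compute the Smolyak indices for the
--     corresponding basis functions. This is the :math:`n` in
--     :math:`\\phi_n`
--     Parameters
--     ----------
--     n : int
--         The last Smolyak index :math:`n` for which the basis polynomial
--         indices should be found
--     Returns
--     -------
--     aphi_chain : dict (int -> list)
--         A dictionary whose keys are the Smolyak index :math:`n` and
--         values are lists containing all basis polynomial subscripts for
--         that Smolyak index
--     """
--     aphi_chain = dict()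
--     aphi_chain[1] = [1]
--     aphi_chain[2] = [2, 3]
--     curr_val = 4
--     for i in range(3, n + 1):
--         end_val = 2 ** (i - 1) + 1
--         temp = range(curr_val, end_val + 1)
--         aphi_chain[i] = temp
--         curr_val = end_val + 1
--     return aphi_chain
-- ===== SOURCE B (Python) =====
-- def _phi_chain(n):
--     # Stage 1: precompute the block-start boundaries by repeated doubling.
--     bounds = [4]
--     while len(bounds) < n - 1:
--         bounds.append(2 * bounds[-1] - 2)
--     # Stage 2: assemble the dict from the boundary table.
--     d = {1: [1], 2: [2, 3]}
--     for i in range(3, n + 1):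
--         d[i] = range(bounds[i - 3], bounds[i - 2])
--     return d
-- ===== Notes on version B (the rewrite author's own statement) =====
-- stated objective: alternative
-- what changed: Replaces A's single pass with a loop-carried scalar accumulator and per-key exponentiation by two staged passes: first a boundary table built by repeated doubling, then the dict is assembled by indexing consecutive entries of that table.
import Mathlib
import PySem

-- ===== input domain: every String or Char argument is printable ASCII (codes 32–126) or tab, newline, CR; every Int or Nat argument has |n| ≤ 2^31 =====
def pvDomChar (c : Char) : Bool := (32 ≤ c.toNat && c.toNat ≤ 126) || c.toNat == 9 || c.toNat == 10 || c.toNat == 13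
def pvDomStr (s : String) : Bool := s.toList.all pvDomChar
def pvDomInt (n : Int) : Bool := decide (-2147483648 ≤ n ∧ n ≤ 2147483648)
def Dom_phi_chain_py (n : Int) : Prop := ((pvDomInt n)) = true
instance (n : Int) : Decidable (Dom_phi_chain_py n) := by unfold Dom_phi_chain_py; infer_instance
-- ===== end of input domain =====

-- B replaces A's loop-carried scalar accumulator by two staged passes: a boundary table
-- built by repeated doubling, then dict assembly by indexing consecutive table entries.

-- ===== PORT A =====
-- literal transliteration of A: dict with keys 1,2, then a loop carrying (dict, curr_val)
def phi_chain_py (n : Int) : List (Int × List Int) :=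
  let d : PySem.Dict Int (List Int) :=
    ((PySem.Dict.empty.insert 1 [1]).insert 2 [2, 3])
  let st :=
    (PySem.List.pyRange 3 (n + 1) 1).foldl
      (fun (st : PySem.Dict Int (List Int) × Int) i =>
        let end_val : Int := 2 ^ (i - 1).toNat + 1
        let temp := PySem.List.pyRange st.2 (end_val + 1) 1
        (st.1.insert i temp, end_val + 1))
      (d, 4)
  st.1.items

-- ===== PORT B =====
-- stage 1 of B: the while-loop 'while len(bounds) < n - 1: bounds.append(2*bounds[-1] - 2)';
-- fuel = number of appends = (n - 2).toNat since the list starts at length 1 and grows by 1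
def pvBoundsLoop : Nat → List Int → List Int
  | 0, acc => acc
  | Nat.succ k, acc => pvBoundsLoop k (acc ++ [2 * (PySem.List.pyGetD acc (-1) 0) - 2])

-- literal transliteration of B: boundary table, then dict assembly indexing the table
def phi_chain_py_alt (n : Int) : List (Int × List Int) :=
  let bounds := pvBoundsLoop (n - 2).toNat [4]
  let d0 : PySem.Dict Int (List Int) :=
    ((PySem.Dict.empty.insert 1 [1]).insert 2 [2, 3])
  let d :=
    (PySem.List.pyRange 3 (n + 1) 1).foldl
      (fun (d : PySem.Dict Int (List Int)) i =>
        d.insert i (PySem.List.pyRange (PySem.List.pyGetD bounds (i - 3) 0)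
                                       (PySem.List.pyGetD bounds (i - 2) 0) 1))
      d0
  d.items

-- ===== PRECONDITION & SPEC =====
def Spec_phi_chain_py (n : Int) (out : List (Int × List Int)) : Prop := out = phi_chain_py_alt n
instance (n : Int) (out : List (Int × List Int)) : Decidable (Spec_phi_chain_py n out) := by unfold Spec_phi_chain_py; infer_instance

-- ===== CLAIM (what is proved, stated in full; the proofs are below) =====
def Claim_equal_phi_chain_py : Prop := ∀ (n : Int), Dom_phi_chain_py n → Spec_phi_chain_py n (phi_chain_py n)

-- ===== LEMMAS AND PROOFS =====

-- the loop body of A's port, named for the lemmas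
def pvStepA (st : PySem.Dict Int (List Int) × Int) (i : Int) :
    PySem.Dict Int (List Int) × Int :=
  let end_val : Int := 2 ^ (i - 1).toNat + 1
  let temp := PySem.List.pyRange st.2 (end_val + 1) 1
  (st.1.insert i temp, end_val + 1)

-- the common closed-form entry both loops produce, named for the lemmas
def pvEntryB (i : Int) : Int × List Int :=
  (i, PySem.List.pyRange (2 ^ (i - 2).toNat + 2) (2 ^ (i - 1).toNat + 2) 1)

-- invariant of A's loop: starting from curr_val = 2^(k-2)+2 and a dict whose keys are
-- all < k, the loop appends exactly the closed-form entries
lemma pvLoopA (m : Nat) : ∀ (k : Int) (d : PySem.Dict Int (List Int)),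
    3 ≤ k → (∀ j ∈ d.keys, j < k) →
    ((PySem.List.pyRange k (k + m) 1).foldl pvStepA (d, 2 ^ (k - 2).toNat + 2)).1.items
      = d.items ++ (PySem.List.pyRange k (k + m) 1).map pvEntryB := by
  induction m with
  | zero =>
    intro k d _ _
    rw [PySem.List.pyRange_one_eq_nil (by omega)]
    simp
  | succ m ih =>
    intro k d hk hkeys
    have hcast : k + ((m + 1 : Nat) : Int) = (k + 1) + (m : Int) := by push_cast; ring
    rw [hcast, PySem.List.pyRange_one_cons (by omega), List.foldl_cons, List.map_cons]
    have hfresh : d.contains k = false := by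
      rcases h : d.contains k with _ | _
      · rfl
      · exact absurd ((PySem.Dict.contains_iff_mem_keys d k).mp h)
          (fun hm => absurd (hkeys k hm) (lt_irrefl k))
    have hstep : pvStepA (d, 2 ^ (k - 2).toNat + 2) k
        = (d.insert k (PySem.List.pyRange (2 ^ (k - 2).toNat + 2) (2 ^ (k - 1).toNat + 2) 1),
           2 ^ ((k + 1) - 2).toNat + 2) := by
      simp only [pvStepA]
      rw [show (2 : Int) ^ (k - 1).toNat + 1 + 1 = 2 ^ (k - 1).toNat + 2 from by ring,
          show k + 1 - 2 = k - 1 from by ring]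
    rw [hstep, ih (k + 1) _ (by omega) ?fresh]
    case fresh =>
      intro j hj
      rcases (PySem.Dict.mem_keys_insert d k j _).mp hj with h | h
      · omega
      · exact lt_trans (hkeys j h) (by omega)
    rw [PySem.Dict.items_insert_of_not_contains d _ hfresh]
    simp [pvEntryB]

-- invariant of B's second loop (generic in the per-key value g): inserting fresh
-- increasing keys just appends the pairs to items
lemma pvLoopB (g : Int → List Int) (m : Nat) : ∀ (k : Int) (d : PySem.Dict Int (List Int)),
    (∀ j ∈ d.keys, j < k) →
    ((PySem.List.pyRange k (k + m) 1).foldl (fun d i => d.insert i (g i)) d).items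
      = d.items ++ (PySem.List.pyRange k (k + m) 1).map (fun i => (i, g i)) := by
  induction m with
  | zero =>
    intro k d _
    rw [PySem.List.pyRange_one_eq_nil (by omega)]
    simp
  | succ m ih =>
    intro k d hkeys
    have hcast : k + ((m + 1 : Nat) : Int) = (k + 1) + (m : Int) := by push_cast; ring
    rw [hcast, PySem.List.pyRange_one_cons (by omega), List.foldl_cons, List.map_cons]
    have hfresh : d.contains k = false := by
      rcases h : d.contains k with _ | _
      · rfl
      · exact absurd ((PySem.Dict.contains_iff_mem_keys d k).mp h)
          (fun hm => absurd (hkeys k hm) (lt_irrefl k))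
    rw [ih (k + 1) _ ?fresh]
    case fresh =>
      intro j hj
      rcases (PySem.Dict.mem_keys_insert d k j _).mp hj with h | h
      · omega
      · exact lt_trans (hkeys j h) (by omega)
    rw [PySem.Dict.items_insert_of_not_contains d _ hfresh]
    simp

-- stage 1 of B computes the powers-of-two boundary table in closed form
lemma pvBoundsLoop_eq (t : Nat) : ∀ (acc : List Int) (m : Nat),
    pvBoundsLoop t (acc ++ [2 ^ (m + 1) + 2])
      = acc ++ (List.range (t + 1)).map (fun j => (2 : Int) ^ (m + 1 + j) + 2) := by
  induction t with
  | zero =>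
    intro acc m
    simp [pvBoundsLoop]
  | succ t ih =>
    intro acc m
    simp only [pvBoundsLoop, PySem.List.pyGetD_neg_one_append_singleton]
    rw [show 2 * ((2 : Int) ^ (m + 1) + 2) - 2 = 2 ^ (m + 1 + 1) + 2 from by ring,
]
    rw [ih (acc ++ [2 ^ (m + 1) + 2]) (m + 1), List.append_assoc]
    congr 1
    rw [show List.range (t + 1 + 1) = 0 :: (List.range (t + 1)).map Nat.succ from
          List.range_succ_eq_map]
    simp only [List.map_cons, List.map_map, List.singleton_append]
    congr 1
    apply List.map_congr_left
    intro j _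
    simp only [Function.comp_apply]
    rw [show m + 1 + 1 + j = m + 1 + j.succ from by omega]

-- ===== VERDICT (by name: the statement is the Claim_ definition above) =====
theorem phi_chain_py_spec : Claim_equal_phi_chain_py := by
  intro n _
  show phi_chain_py n = phi_chain_py_alt n
  by_cases hn : n + 1 ≤ 3
  · simp only [phi_chain_py, phi_chain_py_alt, PySem.List.pyRange_one_eq_nil hn,
      List.foldl_nil]
  · -- n ≥ 3
    have hbounds : pvBoundsLoop (n - 2).toNat [4]
        = (List.range ((n - 2).toNat + 1)).map (fun j => (2 : Int) ^ (0 + 1 + j) + 2) := by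
      have := pvBoundsLoop_eq (n - 2).toNat ([] : List Int) 0
      simpa using this
    have hsplit : (3 : Int) + ((n + 1 - 3).toNat : Int) = n + 1 := by omega
    -- A's side
    have hA := pvLoopA ((n + 1 - 3).toNat) 3
      ((PySem.Dict.empty.insert 1 [1]).insert 2 [2, 3]) (le_refl 3) (by decide)
    rw [hsplit] at hA
    rw [show (2 : Int) ^ ((3 : Int) - 2).toNat + 2 = 4 from by decide] at hA
    -- B's side
    have hB := pvLoopB
      (fun i => PySem.List.pyRange
        (PySem.List.pyGetD (pvBoundsLoop (n - 2).toNat [4]) (i - 3) 0)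
        (PySem.List.pyGetD (pvBoundsLoop (n - 2).toNat [4]) (i - 2) 0) 1)
      ((n + 1 - 3).toNat) 3
      ((PySem.Dict.empty.insert 1 [1]).insert 2 [2, 3]) (by decide)
    rw [hsplit] at hB
    -- the two per-key value maps coincide on the range
    have hlen : (pvBoundsLoop (n - 2).toNat [4]).length = (n - 2).toNat + 1 := by
      rw [hbounds]; simp
    have hidx : ∀ (a : Int), 3 ≤ a → a ≤ n + 1 →
        PySem.List.pyGetD (pvBoundsLoop (n - 2).toNat [4]) (a - 3) 0
          = 2 ^ (a - 2).toNat + 2 := by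
      intro a ha hb
      have h2 : a - 3 < ((pvBoundsLoop (n - 2).toNat [4]).length : Int) := by
        rw [hlen]; push_cast; omega
      rw [PySem.List.pyGetD_eq_getElem _ _ (by omega) h2]
      rw [List.getElem_of_eq hbounds]
      rw [List.getElem_map, List.getElem_range]
      congr 2
      omega
    have hmap : (PySem.List.pyRange 3 (n + 1) 1).map
        (fun i => (i, PySem.List.pyRange
          (PySem.List.pyGetD (pvBoundsLoop (n - 2).toNat [4]) (i - 3) 0)
          (PySem.List.pyGetD (pvBoundsLoop (n - 2).toNat [4]) (i - 2) 0) 1))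
        = (PySem.List.pyRange 3 (n + 1) 1).map pvEntryB := by
      apply List.map_congr_left
      intro i hi
      rw [PySem.List.mem_pyRange_one] at hi
      simp only [pvEntryB]
      rw [hidx i (by omega) (by omega),
          show i - 2 = (i + 1) - 3 from by ring,
          hidx (i + 1) (by omega) (by omega),
          show (i + 1) - 2 = i - 1 from by ring]
    exact hA.trans ((hB.trans (by rw [hmap])).symm)
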